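-- pv_equiv track=rewrite | github.com/raeez/chiral-bar-cobar | compute/lib/bar_gf_universality_engine.py | dims_betagamma
-- ===== SOURCE A (Python) =====
-- from typing import Dict, List, Optional, Tuple, Union
--
-- def dims_betagamma(N: int) -> List[int]:
--     """H^1_n(B(betagamma)): [x^n] of sqrt((1+x)/(1-3x)) for n >= 1.
--
--     Recurrence: n*a(n) = 2n*a(n-1) + 3(n-2)*a(n-2), a(0)=1, a(1)=2.
--     """
--     a = [0] * (N + 1)
--     a[0] = 1
--     if N >= 1:
--         a[1] = 2
--     for n in range(2, N + 1):
--         a[n] = (2 * n * a[n - 1] + 3 * (n - 2) * a[n - 2]) // n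
--     return a[1:N + 1]
-- ===== SOURCE B (Python) =====
-- def dims_betagamma(N: int):
--     """[x^n] sqrt((1+x)/(1-3x)) for n = 1..N, via the central trinomial
--     coefficients T (A002426): n*T(n) = (2n-1)*T(n-1) + 3*(n-1)*T(n-2),
--     T(0) = T(1) = 1, and the identity a(n) = T(n) + T(n-1)."""
--     T = [1, 1]
--     for n in range(2, N + 1):
--         T.append(((2 * n - 1) * T[-1] + 3 * (n - 1) * T[-2]) // n)
--     return [T[n] + T[n - 1] for n in range(1, N + 1)]
-- ===== Notes on version B (the rewrite author's own statement) =====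
-- stated objective: alternative
-- what changed: Instead of A's in-place recurrence computing a(n) itself over a preallocated array, B computes the central trinomial coefficients T by their own three-term recurrence in an append-grown list and returns the adjacent sums T(n) + T(n-1).
import Mathlib
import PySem

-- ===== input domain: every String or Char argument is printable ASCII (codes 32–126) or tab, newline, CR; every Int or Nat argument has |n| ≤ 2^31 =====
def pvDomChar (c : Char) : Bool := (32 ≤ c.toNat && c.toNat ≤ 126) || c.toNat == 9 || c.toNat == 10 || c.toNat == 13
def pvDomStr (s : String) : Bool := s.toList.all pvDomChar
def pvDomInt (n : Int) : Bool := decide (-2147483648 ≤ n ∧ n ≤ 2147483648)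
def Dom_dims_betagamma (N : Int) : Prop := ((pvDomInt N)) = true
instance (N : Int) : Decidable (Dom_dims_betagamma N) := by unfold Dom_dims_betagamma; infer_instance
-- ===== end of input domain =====

-- B computes the central trinomial coefficients T by their own recurrence and returns the adjacent
-- sums a(n) = T(n) + T(n-1), instead of A's direct recurrence on a(n) in a mutable array (objective: alternative).

-- ===== PORT A =====
-- Literal port of A: array of N+1 zeros, a[0]=1, a[1]=2 if N≥1, loop n=2..N with floor division, slice a[1:N+1].
-- a[n-1]/a[n-2] read via pyGet? with default 0 (the index is always in range inside Pre_).
def aStep (a : List Int) (n : Int) : List Int :=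
  a.set n.toNat
    (PySem.Int.floordiv
      (2 * n * ((PySem.List.pyGet? a (n - 1)).getD 0) +
       3 * (n - 2) * ((PySem.List.pyGet? a (n - 2)).getD 0)) n)

def dims_betagamma (N : Int) : List Int :=
  PySem.List.slice
    ((PySem.List.pyRange 2 (N + 1) 1).foldl aStep
      (if N ≥ 1 then ((List.replicate ((N + 1).toNat) (0 : Int)).set 0 1).set 1 2
       else (List.replicate ((N + 1).toNat) (0 : Int)).set 0 1))
    (some 1) (some (N + 1))

-- ===== PORT B =====
-- Literal port of Source B: T = [1,1]; for n in 2..N append ((2n-1)*T[-1] + 3(n-1)*T[-2]) // n;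
-- return [T[n] + T[n-1] for n in 1..N].  T[-1], T[-2], T[n], T[n-1] via pyGet? with default 0
-- (always in range for the indices the loops produce).
def bStep (T : List Int) (n : Int) : List Int :=
  T ++ [PySem.Int.floordiv
    ((2 * n - 1) * ((PySem.List.pyGet? T (-1)).getD 0) +
     3 * (n - 1) * ((PySem.List.pyGet? T (-2)).getD 0)) n]

def dims_betagamma_alt (N : Int) : List Int :=
  let T := (PySem.List.pyRange 2 (N + 1) 1).foldl bStep [1, 1]
  (PySem.List.pyRange 1 (N + 1) 1).map
    (fun n => ((PySem.List.pyGet? T n).getD 0) + ((PySem.List.pyGet? T (n - 1)).getD 0))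

-- ===== PRECONDITION & SPEC =====
-- Pre_ excludes N < 0, where A raises IndexError (a[0]=1 on an empty list); A returns on every N ≥ 0.
def Pre_dims_betagamma (N : Int) : Prop := 0 ≤ N
instance (N : Int) : Decidable (Pre_dims_betagamma N) := by unfold Pre_dims_betagamma; infer_instance
def pvWitness_dims_betagamma : Int := 5

def Spec_dims_betagamma (N : Int) (out : List Int) : Prop := out = dims_betagamma_alt N
instance (N : Int) (out : List Int) : Decidable (Spec_dims_betagamma N out) := by unfold Spec_dims_betagamma; infer_instance

-- ===== CLAIM (what is proved, stated in full; the proofs are below) =====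
def Claim_equal_dims_betagamma : Prop := ∀ (N : Int), Dom_dims_betagamma N → Pre_dims_betagamma N → Spec_dims_betagamma N (dims_betagamma N)

-- ===== LEMMAS AND PROOFS =====

-- The mathematical value both programs compute: Pz m = Σ_{j≤m} (-1)^j catalan(j) C(m,j) 3^(m-j),
-- and a(n) = 2·Pz (n-1) for n ≥ 1 (a(0) = 1).
def Pz (m : ℕ) : ℤ := ∑ j ∈ Finset.range (m + 1), (-1) ^ j * (catalan j : ℤ) * (m.choose j : ℤ) * 3 ^ (m - j)
def Qz (m : ℕ) : ℤ := ∑ j ∈ Finset.range (m + 1), (-1) ^ j * (catalan (j + 1) : ℤ) * (m.choose j : ℤ) * 3 ^ (m - j)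

def aval : ℕ → ℤ
  | 0 => 1
  | n + 1 => 2 * Pz n

-- catalan's hypergeometric step, over ℤ
lemma catalan_step_nat (j : ℕ) : (j + 2) * catalan (j + 1) = 2 * (2 * j + 1) * catalan j := by
  have h1 : (j + 1 + 1) * catalan (j + 1) = Nat.centralBinom (j + 1) :=
    succ_mul_catalan_eq_centralBinom (j + 1)
  have h2' : (j + 1) * Nat.centralBinom (j + 1) = 2 * (2 * j + 1) * Nat.centralBinom j :=
    Nat.succ_mul_centralBinom_succ j
  have h3 : (j + 1) * catalan j = Nat.centralBinom j := succ_mul_catalan_eq_centralBinom j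
  have hkey : Nat.centralBinom (j + 1) = 2 * (2 * j + 1) * catalan j := by
    have := Nat.eq_of_mul_eq_mul_left (show 0 < j + 1 by omega)
      (show (j + 1) * Nat.centralBinom (j + 1) = (j + 1) * (2 * (2 * j + 1) * catalan j) by
        rw [h2', ← h3]; ring)
    exact this
  calc (j + 2) * catalan (j + 1) = (j + 1 + 1) * catalan (j + 1) := by ring
    _ = Nat.centralBinom (j + 1) := h1
    _ = 2 * (2 * j + 1) * catalan j := hkey

lemma catalan_step (j : ℕ) : ((j : ℤ) + 2) * (catalan (j + 1) : ℤ) = 2 * (2 * (j : ℤ) + 1) * (catalan j : ℤ) := by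
  have h : ((j + 2) * catalan (j + 1) : ℤ) = (2 * (2 * j + 1) * catalan j : ℤ) := by
    exact_mod_cast congrArg (Nat.cast : ℕ → ℤ) (catalan_step_nat j)
  push_cast at h
  linarith [h]

-- Pascal: Pz (m+1) = 3·Pz m − Qz m
lemma Pz_succ (m : ℕ) : Pz (m + 1) = 3 * Pz m - Qz m := by
  have hsplit : Pz (m + 1)
      = (∑ i ∈ Finset.range (m + 1),
          (-((-1) ^ i * (catalan (i + 1) : ℤ) * (m.choose i : ℤ) * 3 ^ (m - i))
           + (-1) ^ (i + 1) * (catalan (i + 1) : ℤ) * (m.choose (i + 1) : ℤ) * 3 ^ (m - i)))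
        + 3 ^ (m + 1) := by
    rw [Pz, Finset.sum_range_succ']
    congr 1
    · refine Finset.sum_congr rfl ?_
      intro i hi
      have hsub : m + 1 - (i + 1) = m - i := by omega
      rw [Nat.choose_succ_succ, hsub]
      push_cast
      ring
    · simp
  have h1 : ∑ i ∈ Finset.range (m + 1),
      -((-1) ^ i * (catalan (i + 1) : ℤ) * (m.choose i : ℤ) * 3 ^ (m - i)) = -Qz m := by
    rw [Qz, ← Finset.sum_neg_distrib]
  have h2 : ∑ i ∈ Finset.range (m + 1),
        (-1) ^ (i + 1) * (catalan (i + 1) : ℤ) * (m.choose (i + 1) : ℤ) * 3 ^ (m - i)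
      = ∑ i ∈ Finset.range m,
        (-1) ^ (i + 1) * (catalan (i + 1) : ℤ) * (m.choose (i + 1) : ℤ) * 3 ^ (m - i) := by
    rw [Finset.sum_range_succ]
    simp
  have h3 : 3 * Pz m
      = (∑ i ∈ Finset.range m,
          (-1) ^ (i + 1) * (catalan (i + 1) : ℤ) * (m.choose (i + 1) : ℤ) * 3 ^ (m - i))
        + 3 ^ (m + 1) := by
    rw [Pz, Finset.mul_sum, Finset.sum_range_succ']
    congr 1
    · refine Finset.sum_congr rfl ?_
      intro i hi
      have hi' : i < m := Finset.mem_range.mp hi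
      have hsub : m - i = (m - (i + 1)) + 1 := by omega
      rw [hsub, pow_succ]
      ring
    · simp [pow_succ]
      ring
  rw [hsplit, Finset.sum_add_distrib, h1, h2]
  linarith [h3]

-- contiguous relation: (m+3)·Qz (m+1) = 2·Pz (m+1) − (m+1)·Qz m
-- the j-weighted sum collapses to Qz of the previous row
lemma Rsum_eq (m : ℕ) :
    (∑ j ∈ Finset.range (m + 2),
      (j : ℤ) * ((-1) ^ j * (catalan j : ℤ) * ((m + 1).choose j : ℤ) * 3 ^ (m + 1 - j)))
    = -(((m : ℤ) + 1) * Qz m) := by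
  rw [Finset.sum_range_succ']
  have hstep : ∀ i ∈ Finset.range (m + 1),
      ((i : ℤ) + 1) * ((-1) ^ (i + 1) * (catalan (i + 1) : ℤ) * ((m + 1).choose (i + 1) : ℤ) * 3 ^ (m + 1 - (i + 1)))
      = -(((m : ℤ) + 1) * ((-1) ^ i * (catalan (i + 1) : ℤ) * (m.choose i : ℤ) * 3 ^ (m - i))) := by
    intro i hi
    have hch : (m + 1) * m.choose i = (m + 1).choose (i + 1) * (i + 1) := Nat.add_one_mul_choose_eq m i
    have hch' : ((m : ℤ) + 1) * (m.choose i : ℤ) = ((m + 1).choose (i + 1) : ℤ) * ((i : ℤ) + 1) := by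
      exact_mod_cast congrArg (Nat.cast : ℕ → ℤ) hch
    have hsub : m + 1 - (i + 1) = m - i := by omega
    rw [hsub]
    linear_combination ((-1 : ℤ) ^ i * (catalan (i + 1) : ℤ) * 3 ^ (m - i)) * hch'
  calc (∑ i ∈ Finset.range (m + 1),
          ((i : ℤ) + 1) * ((-1) ^ (i + 1) * (catalan (i + 1) : ℤ) * ((m + 1).choose (i + 1) : ℤ) * 3 ^ (m + 1 - (i + 1))))
        + (0 : ℤ) * ((-1) ^ 0 * (catalan 0 : ℤ) * ((m + 1).choose 0 : ℤ) * 3 ^ (m + 1 - 0))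
      = ∑ i ∈ Finset.range (m + 1),
          -(((m : ℤ) + 1) * ((-1) ^ i * (catalan (i + 1) : ℤ) * (m.choose i : ℤ) * 3 ^ (m - i))) := by
        rw [Finset.sum_congr rfl hstep]; ring
    _ = -(((m : ℤ) + 1) * Qz m) := by
        rw [Qz, Finset.mul_sum, ← Finset.sum_neg_distrib]

lemma Qz_succ (m : ℕ) : ((m : ℤ) + 3) * Qz (m + 1) = 2 * Pz (m + 1) - ((m : ℤ) + 1) * Qz m := by
  have hsplit : ((m : ℤ) + 3) * Qz (m + 1)
      = (∑ j ∈ Finset.range (m + 2),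
          (4 * ((j : ℤ) * ((-1) ^ j * (catalan j : ℤ) * ((m + 1).choose j : ℤ) * 3 ^ (m + 1 - j)))
           + 2 * ((-1) ^ j * (catalan j : ℤ) * ((m + 1).choose j : ℤ) * 3 ^ (m + 1 - j))))
        + (∑ j ∈ Finset.range (m + 2),
          ((m + 1 - j : ℕ) : ℤ) * ((-1) ^ j * (catalan (j + 1) : ℤ) * ((m + 1).choose j : ℤ) * 3 ^ (m + 1 - j))) := by
    rw [Qz, Finset.mul_sum, ← Finset.sum_add_distrib]
    refine Finset.sum_congr rfl ?_
    intro j hj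
    have hj' : j ≤ m + 1 := by
      have := Finset.mem_range.mp hj; omega
    have hm3 : (m : ℤ) + 3 = ((j : ℤ) + 2) + ((m + 1 - j : ℕ) : ℤ) := by
      have : ((m + 1 - j : ℕ) : ℤ) = (m : ℤ) + 1 - (j : ℤ) := by
        push_cast [Nat.cast_sub (by omega : j ≤ m + 1)]; ring
      rw [this]; ring
    have hcat := catalan_step j
    rw [hm3, add_mul]
    have hterm1 : ((j : ℤ) + 2) * ((-1) ^ j * (catalan (j + 1) : ℤ) * ((m + 1).choose j : ℤ) * 3 ^ (m + 1 - j))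
        = 4 * ((j : ℤ) * ((-1) ^ j * (catalan j : ℤ) * ((m + 1).choose j : ℤ) * 3 ^ (m + 1 - j)))
          + 2 * ((-1) ^ j * (catalan j : ℤ) * ((m + 1).choose j : ℤ) * 3 ^ (m + 1 - j)) := by
      linear_combination ((-1 : ℤ) ^ j * (((m + 1).choose j : ℕ) : ℤ) * 3 ^ (m + 1 - j)) * hcat
    rw [hterm1]
  have hterm2 : (∑ j ∈ Finset.range (m + 2),
        ((m + 1 - j : ℕ) : ℤ) * ((-1) ^ j * (catalan (j + 1) : ℤ) * ((m + 1).choose j : ℤ) * 3 ^ (m + 1 - j)))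
      = 3 * (((m : ℤ) + 1) * Qz m) := by
    have hper : ∀ j ∈ Finset.range (m + 1),
        ((m + 1 - j : ℕ) : ℤ) * ((-1) ^ j * (catalan (j + 1) : ℤ) * ((m + 1).choose j : ℤ) * 3 ^ (m + 1 - j))
        = 3 * (((m : ℤ) + 1) * ((-1) ^ j * (catalan (j + 1) : ℤ) * (m.choose j : ℤ) * 3 ^ (m - j))) := by
      intro j hj
      have hj' : j ≤ m := by
        have := Finset.mem_range.mp hj; omega
      have hch : m.choose j * (m + 1) = (m + 1).choose j * (m + 1 - j) := Nat.choose_mul_succ_eq m j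
      have hch' : (m.choose j : ℤ) * ((m : ℤ) + 1) = ((m + 1).choose j : ℤ) * ((m + 1 - j : ℕ) : ℤ) := by
        exact_mod_cast congrArg (Nat.cast : ℕ → ℤ) hch
      have e2 : m + 1 - j = (m - j) + 1 := by omega
      rw [e2, pow_succ]
      have e3 : ((m - j + 1 : ℕ) : ℤ) = (m : ℤ) - (j : ℤ) + 1 := by omega
      have e1 : ((m + 1 - j : ℕ) : ℤ) = (m : ℤ) - (j : ℤ) + 1 := by omega
      rw [e3]
      rw [e1] at hch'
      linear_combination (-(3 : ℤ) * (-1 : ℤ) ^ j * (catalan (j + 1) : ℤ) * 3 ^ (m - j)) * hch'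
    rw [Finset.sum_range_succ, Finset.sum_congr rfl hper]
    have hlast : ((m + 1 - (m + 1) : ℕ) : ℤ) = 0 := by simp
    rw [hlast, zero_mul, add_zero, Qz, Finset.mul_sum, Finset.mul_sum]
  rw [hsplit, hterm2, Finset.sum_add_distrib, ← Finset.mul_sum, ← Finset.mul_sum, Rsum_eq]
  have : (∑ j ∈ Finset.range (m + 2),
      ((-1) ^ j * (catalan j : ℤ) * ((m + 1).choose j : ℤ) * 3 ^ (m + 1 - j))) = Pz (m + 1) := rfl
  rw [this]
  ring

-- the second-order recurrence for Pz
lemma Pz_rec (m : ℕ) : ((m : ℤ) + 3) * Pz (m + 2) = (2 * (m : ℤ) + 6) * Pz (m + 1) + (3 * (m : ℤ) + 3) * Pz m := by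
  have h1 := Pz_succ (m + 1)
  have h2 := Pz_succ m
  have h3 := Qz_succ m
  linear_combination ((m : ℤ) + 3) * h1 - h3 + ((m : ℤ) + 1) * h2

lemma Pz_zero : Pz 0 = 1 := by
  simp [Pz]

lemma Pz_one : Pz 1 = 2 := by
  rw [Pz, Finset.sum_range_succ, Finset.sum_range_succ, Finset.sum_range_zero]
  simp [catalan_one]

-- A's recurrence holds exactly for aval
lemma aval_rec (k : ℕ) : ((k : ℤ) + 2) * aval (k + 2) = 2 * ((k : ℤ) + 2) * aval (k + 1) + 3 * (k : ℤ) * aval k := by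
  cases k with
  | zero =>
    show (2 : ℤ) * (2 * Pz 1) = 2 * 2 * (2 * Pz 0) + 3 * 0 * aval 0
    rw [Pz_zero, Pz_one]; ring
  | succ t =>
    show ((t : ℤ) + 1 + 2) * (2 * Pz (t + 2)) = 2 * ((t : ℤ) + 1 + 2) * (2 * Pz (t + 1)) + 3 * ((t : ℤ) + 1) * (2 * Pz t)
    linear_combination 2 * Pz_rec t

-- ---------- B port: the T list holds the central trinomial numbers Tz ----------

-- the sequence Source B builds: Tz 0 = 1 and Tz (m+1) + Tz m = a(m+1) = 2 * Pz m
def Tz : ℕ → ℤ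
  | 0 => 1
  | m + 1 => 2 * Pz m - Tz m

-- the central-trinomial recurrence Source B divides by, exact over ℤ
lemma Tz_rec (m : ℕ) : ((m : ℤ) + 2) * Tz (m + 2) = (2 * (m : ℤ) + 3) * Tz (m + 1) + (3 * (m : ℤ) + 3) * Tz m := by
  induction m with
  | zero =>
    show (0 + 2 : ℤ) * (2 * Pz 1 - (2 * Pz 0 - Tz 0)) = (2 * 0 + 3 : ℤ) * (2 * Pz 0 - Tz 0) + (2 * 0 + 3 : ℤ) * Tz 0
    rw [Pz_zero, Pz_one]
    norm_num [Tz]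
  | succ t ih =>
    have hp := Pz_rec t
    simp only [Tz] at ih ⊢
    push_cast
    linear_combination 2 * hp - ih

lemma bStep_T (m : Int) (h2 : 2 ≤ m) :
    bStep ((List.range m.toNat).map Tz) m = (List.range (m.toNat + 1)).map Tz := by
  set mt := m.toNat with hmt
  have hmt2 : 2 ≤ mt := by omega
  have hlen : ((List.range mt).map Tz).length = mt := by simp
  unfold bStep
  have hg1 : (PySem.List.pyGet? ((List.range mt).map Tz) (-1)).getD 0 = Tz (mt - 1) := by
    rw [PySem.List.pyGet?_neg_ofNat _ 1 (by omega) (by omega : 1 ≤ ((List.range mt).map Tz).length),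
      hlen, List.getElem?_map, List.getElem?_range (by omega : mt - 1 < mt)]
    rfl
  have hg2 : (PySem.List.pyGet? ((List.range mt).map Tz) (-2)).getD 0 = Tz (mt - 2) := by
    rw [PySem.List.pyGet?_neg_ofNat _ 2 (by omega) (by omega : 2 ≤ ((List.range mt).map Tz).length),
      hlen, List.getElem?_map, List.getElem?_range (by omega : mt - 2 < mt)]
    rfl
  rw [hg1, hg2]
  have hrec : (2 * m - 1) * Tz (mt - 1) + 3 * (m - 1) * Tz (mt - 2) = m * Tz mt := by
    have h := Tz_rec (mt - 2)
    rw [show mt - 2 + 2 = mt by omega, show mt - 2 + 1 = mt - 1 by omega] at h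
    have hcast : ((mt - 2 : ℕ) : ℤ) = m - 2 := by omega
    rw [hcast] at h
    nlinarith [h]
  rw [hrec, PySem.Int.floordiv_eq_ediv_of_pos (by omega : (0 : Int) < m),
    Int.mul_ediv_cancel_left _ (by omega : m ≠ 0), List.range_succ, List.map_append]
  rfl

lemma bLoop (N : Int) : ∀ (m : Int) (_ : 2 ≤ m), m ≤ N + 1 →
    (PySem.List.pyRange 2 m 1).foldl bStep [1, 1] = (List.range m.toNat).map Tz := by
  intro m h2
  induction m, h2 using Int.le_induction with
  | base =>
    intro _
    rw [PySem.List.pyRange_one_eq_nil le_rfl]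
    show ([1, 1] : List Int) = [Tz 0, Tz 1]
    show ([1, 1] : List Int) = [1, 2 * Pz 0 - 1]
    rw [Pz_zero]
    norm_num
  | succ m hm ih =>
    intro hle
    rw [PySem.List.pyRange_one_succ_right (by omega : (2 : Int) ≤ m), List.foldl_append]
    rw [ih (by omega)]
    simp only [List.foldl_cons, List.foldl_nil]
    rw [bStep_T m hm, show (m + 1).toNat = m.toNat + 1 by omega]

lemma alt_eq (N : Int) (hN : 0 ≤ N) :
    dims_betagamma_alt N = (List.range N.toNat).map (fun k => aval (k + 1)) := by
  unfold dims_betagamma_alt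
  by_cases h1 : 1 ≤ N
  · rw [bLoop N (N + 1) (by omega) le_rfl]
    rw [PySem.List.pyRange_one, show ((N : ℤ) + 1 - 1).toNat = N.toNat by omega, List.map_map]
    refine List.map_congr_left ?_
    intro k hk
    have hkN : k < N.toNat := List.mem_range.mp hk
    have hlen : ((List.range (N + 1).toNat).map Tz).length = (N + 1).toNat := by simp
    show (PySem.List.pyGet? ((List.range (N + 1).toNat).map Tz) (1 + (k : ℤ))).getD 0
        + (PySem.List.pyGet? ((List.range (N + 1).toNat).map Tz) (1 + (k : ℤ) - 1)).getD 0 = aval (k + 1)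
    rw [PySem.List.pyGet?_of_nonneg _ (by omega : (0 : ℤ) ≤ 1 + (k : ℤ)),
      PySem.List.pyGet?_of_nonneg _ (by omega : (0 : ℤ) ≤ 1 + (k : ℤ) - 1),
      show ((1 : ℤ) + (k : ℤ)).toNat = k + 1 by omega,
      show ((1 : ℤ) + (k : ℤ) - 1).toNat = k by omega,
      List.getElem?_map, List.getElem?_map,
      List.getElem?_range (by omega : k + 1 < (N + 1).toNat),
      List.getElem?_range (by omega : k < (N + 1).toNat)]
    show Tz (k + 1) + Tz k = aval (k + 1)
    show 2 * Pz k - Tz k + Tz k = 2 * Pz k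
    ring
  · have hN0 : N = 0 := by omega
    subst hN0
    rw [PySem.List.pyRange_one_eq_nil (by omega : (0 : ℤ) + 1 ≤ 1)]
    rfl

-- ---------- A port: the loop fills the array with aval ----------

-- the contents of A's array once entries < k have been computed
def arrA (L k : ℕ) : List Int := (List.range L).map (fun i => if i < k then aval i else 0)

lemma arrA_getElem? (L k i : ℕ) (h : i < L) :
    (arrA L k)[i]? = some (if i < k then aval i else 0) := by
  simp [arrA, List.getElem?_map, List.getElem?_range h]

lemma arrA_set (L k : ℕ) (hk : k < L) : (arrA L k).set k (aval k) = arrA L (k + 1) := by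
  refine List.ext_getElem (by simp [arrA]) ?_
  intro i h1 h2
  simp only [arrA, List.getElem_set, List.getElem_map, List.getElem_range]
  split_ifs <;> (try subst_vars) <;> first | rfl | omega

lemma init_eq (N : Int) (h : 0 ≤ N) :
    (if N ≥ 1 then ((List.replicate ((N + 1).toNat) (0 : Int)).set 0 1).set 1 2
     else (List.replicate ((N + 1).toNat) (0 : Int)).set 0 1) = arrA (N + 1).toNat 2 := by
  have haval0 : aval 0 = 1 := rfl
  have haval1 : aval 1 = 2 := by show 2 * Pz 0 = 2; rw [Pz_zero]; ring
  split_ifs with h1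
  · refine List.ext_getElem (by simp [arrA]) ?_
    intro i hl1 hl2
    have hiL : i < (N + 1).toNat := by simpa using hl1
    simp only [arrA, List.getElem_set, List.getElem_map, List.getElem_range, List.getElem_replicate]
    split_ifs <;> (try subst_vars) <;> first | rfl | omega
  · refine List.ext_getElem (by simp [arrA]) ?_
    intro i hl1 hl2
    have hiL : i < (N + 1).toNat := by simpa using hl1
    have hN0 : N = 0 := by omega
    simp only [arrA, List.getElem_set, List.getElem_map, List.getElem_range, List.getElem_replicate]
    split_ifs <;> (try subst_vars) <;> first | rfl | omega

lemma aStep_arrA (N m : Int) (h2 : 2 ≤ m) (hm : m ≤ N) :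
    aStep (arrA (N + 1).toNat m.toNat) m = arrA (N + 1).toNat (m.toNat + 1) := by
  set L := (N + 1).toNat with hL
  set mt := m.toNat with hmt
  have hmt2 : 2 ≤ mt := by omega
  have hmtL : mt < L := by omega
  unfold aStep
  have hg1 : (PySem.List.pyGet? (arrA L mt) (m - 1)).getD 0 = aval (mt - 1) := by
    rw [PySem.List.pyGet?_of_nonneg _ (by omega : (0 : Int) ≤ m - 1),
      show (m - 1).toNat = mt - 1 by omega, arrA_getElem? L mt (mt - 1) (by omega),
      if_pos (by omega : mt - 1 < mt)]
    rfl
  have hg2 : (PySem.List.pyGet? (arrA L mt) (m - 2)).getD 0 = aval (mt - 2) := by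
    rw [PySem.List.pyGet?_of_nonneg _ (by omega : (0 : Int) ≤ m - 2),
      show (m - 2).toNat = mt - 2 by omega, arrA_getElem? L mt (mt - 2) (by omega),
      if_pos (by omega : mt - 2 < mt)]
    rfl
  rw [hg1, hg2]
  have hrec : 2 * m * aval (mt - 1) + 3 * (m - 2) * aval (mt - 2) = m * aval mt := by
    have h := aval_rec (mt - 2)
    rw [show mt - 2 + 2 = mt by omega, show mt - 2 + 1 = mt - 1 by omega] at h
    have hcast : ((mt - 2 : ℕ) : ℤ) = m - 2 := by omega
    rw [hcast] at h
    have hm' : ((mt : ℕ) : ℤ) = m := by omega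
    nlinarith [h, hm']
  rw [hrec, PySem.Int.floordiv_eq_ediv_of_pos (by omega : (0 : Int) < m),
    Int.mul_ediv_cancel_left _ (by omega : m ≠ 0)]
  exact arrA_set L mt hmtL

lemma aLoop (N : Int) : ∀ (m : Int) (_ : 2 ≤ m), m ≤ N + 1 →
    (PySem.List.pyRange 2 m 1).foldl aStep (arrA (N + 1).toNat 2) = arrA (N + 1).toNat m.toNat := by
  intro m h2
  induction m, h2 using Int.le_induction with
  | base =>
    intro _
    rw [PySem.List.pyRange_one_eq_nil le_rfl]
    rfl
  | succ m hm ih =>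
    intro hle
    rw [PySem.List.pyRange_one_succ_right (by omega : (2 : Int) ≤ m), List.foldl_append]
    rw [ih (by omega)]
    simp only [List.foldl_cons, List.foldl_nil]
    rw [aStep_arrA N m hm (by omega), show (m + 1).toNat = m.toNat + 1 by omega]

lemma a_eq (N : Int) (hN : 0 ≤ N) :
    dims_betagamma N = (List.range N.toNat).map (fun k => aval (k + 1)) := by
  unfold dims_betagamma
  rw [init_eq N hN]
  by_cases h1 : 1 ≤ N
  · rw [aLoop N (N + 1) (by omega) le_rfl]
    have hfin : arrA (N + 1).toNat (N + 1).toNat = (List.range (N + 1).toNat).map aval := by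
      refine List.map_congr_left ?_
      intro i hi
      rw [if_pos (List.mem_range.mp hi)]
    rw [hfin, PySem.List.slice_of_nonneg _ (by omega) (by omega)
        (by simp only [List.length_map, List.length_range]; omega)
        (by simp only [List.length_map, List.length_range]; omega),
      show ((N : ℤ) + 1).toNat = N.toNat + 1 by omega, List.range_succ_eq_map, List.map_cons]
    simp only [show ((1 : ℤ)).toNat = 1 from rfl, List.drop_succ_cons, List.drop_zero, List.map_map]
    rw [List.take_of_length_le (by simp)]
    rfl
  · have hN0 : N = 0 := by omega
    subst hN0
    rw [PySem.List.pyRange_one_eq_nil (by omega : (0 : Int) + 1 ≤ 2)]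
    rfl

theorem dims_betagamma_spec : Claim_equal_dims_betagamma := by
  intro N _ hpre
  unfold Spec_dims_betagamma
  rw [a_eq N hpre, alt_eq N hpre]
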